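-- pv_equiv track=rewrite | github.com/FI-Mihej/Cengal | cengal/data_containers/dynamic_list_of_pieces/dynamic_list_of_pieces__cpython.py | get_num_pieces_with_full_size_lesser_than_with_offset
-- ===== SOURCE A (Python) =====
-- def get_num_pieces_with_full_size_lesser_than_with_offset(iter_object, full_size, offset):
--     pieces_qnt = -1
--     if iter_object:
--         object_size = len(iter_object)
--         result_data_length = 0
--         pieces_qnt = 0
--         for piece_num in range(offset, object_size):
--             piece = iter_object[piece_num]
--             piece_length = len(piece)
--             if (result_data_length + piece_length) > full_size:
--                 break
--             else:
--                 result_data_length += piece_length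
--                 pieces_qnt += 1
--     return pieces_qnt
-- ===== SOURCE B (Python) =====
-- def get_num_pieces_with_full_size_lesser_than_with_offset(iter_object, full_size, offset):
--     if not iter_object:
--         return -1
--     # build the running cumulative sizes of the pieces at indices offset..len-1
--     sums = []
--     total = 0
--     for piece_num in range(offset, len(iter_object)):
--         total += len(iter_object[piece_num])
--         sums.append(total)
--     # binary-search the monotone prefix-sum table for the largest prefix with sum <= full_size
--     lo, hi = 0, len(sums)
--     while lo < hi:
--         mid = (lo + hi) // 2
--         if sums[mid] <= full_size:
--             lo = mid + 1
--         else: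
--             hi = mid
--     return lo
-- ===== Notes on version B (the rewrite author's own statement) =====
-- stated objective: alternative
-- what changed: B precomputes the running cumulative sizes of the pieces from offset onward and binary-searches that monotone prefix-sum table (bisect_right by hand) for the largest prefix with sum <= full_size, instead of A's single scan with an early break.
import Mathlib
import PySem

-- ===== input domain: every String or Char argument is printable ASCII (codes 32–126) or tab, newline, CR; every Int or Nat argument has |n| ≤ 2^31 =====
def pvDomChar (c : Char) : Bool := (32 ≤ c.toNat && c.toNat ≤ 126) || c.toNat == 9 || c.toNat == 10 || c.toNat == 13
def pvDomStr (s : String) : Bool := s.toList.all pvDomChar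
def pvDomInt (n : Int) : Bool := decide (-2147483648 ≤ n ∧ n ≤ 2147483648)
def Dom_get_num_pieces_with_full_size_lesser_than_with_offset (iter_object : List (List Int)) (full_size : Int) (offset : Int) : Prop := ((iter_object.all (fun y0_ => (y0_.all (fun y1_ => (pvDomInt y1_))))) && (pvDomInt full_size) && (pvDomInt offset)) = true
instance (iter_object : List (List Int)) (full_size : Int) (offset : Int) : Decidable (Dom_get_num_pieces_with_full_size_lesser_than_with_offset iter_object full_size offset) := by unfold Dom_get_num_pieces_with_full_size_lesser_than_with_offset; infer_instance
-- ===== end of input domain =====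

-- B replaces A's scan-with-break by a prefix-sum table plus a hand-written bisect_right; same cost, different algorithm (return value proved equal on Pre_).

-- ===== PORT A =====
-- len(iter_object[i]) as an Int; pyGetD models Python indexing (negative = from the end);
-- under Pre_ every index reached is in range, so the default is never returned.
def pvLenAt (xs : List (List Int)) (i : Int) : Int :=
  ((PySem.List.pyGetD xs i []).length : Int)

-- A's for-loop with `break`: state = (result_data_length, pieces_qnt)
def pvALoop (xs : List (List Int)) (full_size : Int) (idxs : List Int) (acc cnt : Int) : Int :=
  match idxs with
  | [] => cnt
  | i :: rest =>
    let piece_length := pvLenAt xs i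
    if acc + piece_length > full_size then cnt
    else pvALoop xs full_size rest (acc + piece_length) (cnt + 1)

def get_num_pieces_with_full_size_lesser_than_with_offset (iter_object : List (List Int)) (full_size : Int) (offset : Int) : Int :=
  if iter_object.isEmpty then -1
  else pvALoop iter_object full_size (PySem.List.pyRange offset (iter_object.length : Int) 1) 0 0

-- ===== PORT B =====
-- B's first loop: running totals `sums`
def pvSumsLoop (xs : List (List Int)) (idxs : List Int) (total : Int) : List Int :=
  match idxs with
  | [] => []
  | i :: rest =>
    let t := total + pvLenAt xs i
    t :: pvSumsLoop xs rest t

-- B's while-loop (bisect_right). lo and hi are nonnegative throughout in the Python,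
-- so Nat arithmetic and (lo+hi)/2 coincide exactly with Python's ints and (lo+hi)//2;
-- mid is always in range (lo ≤ mid < hi ≤ len sums), so getD's default is never returned.
-- `fuel` is only a structural-recursion device: each Python iteration shrinks hi - lo,
-- and pvBS is called with fuel = sums.length ≥ hi - lo, so fuel never runs out.
def pvBS (sums : List Int) (full_size : Int) : Nat → Nat → Nat → Nat
  | 0, lo, _hi => lo
  | fuel + 1, lo, hi =>
    if lo < hi then
      let mid := (lo + hi) / 2
      if sums.getD mid 0 ≤ full_size then pvBS sums full_size fuel (mid + 1) hi
      else pvBS sums full_size fuel lo mid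
    else lo

def get_num_pieces_with_full_size_lesser_than_with_offset_alt (iter_object : List (List Int)) (full_size : Int) (offset : Int) : Int :=
  if iter_object.isEmpty then -1
  else
    let sums := pvSumsLoop iter_object (PySem.List.pyRange offset (iter_object.length : Int) 1) 0
    ((pvBS sums full_size sums.length 0 sums.length : Nat) : Int)

-- ===== PRECONDITION & SPEC =====
-- Pre_ excludes exactly the inputs where the Python A raises IndexError (and B raises it too):
-- a nonempty list with offset < -len, where the very first indexing iter_object[offset] fails.
def Pre_get_num_pieces_with_full_size_lesser_than_with_offset (iter_object : List (List Int)) (full_size : Int) (offset : Int) : Prop :=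
  iter_object = [] ∨ -(iter_object.length : Int) ≤ offset
instance (iter_object : List (List Int)) (full_size : Int) (offset : Int) : Decidable (Pre_get_num_pieces_with_full_size_lesser_than_with_offset iter_object full_size offset) := by unfold Pre_get_num_pieces_with_full_size_lesser_than_with_offset; infer_instance

def pvWitness_get_num_pieces_with_full_size_lesser_than_with_offset : List (List Int) × Int × Int := ([[1], [2, 3]], 3, 0)

def Spec_get_num_pieces_with_full_size_lesser_than_with_offset (iter_object : List (List Int)) (full_size : Int) (offset : Int) (out : Int) : Prop := out = get_num_pieces_with_full_size_lesser_than_with_offset_alt iter_object full_size offset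
instance (iter_object : List (List Int)) (full_size : Int) (offset : Int) (out : Int) : Decidable (Spec_get_num_pieces_with_full_size_lesser_than_with_offset iter_object full_size offset out) := by unfold Spec_get_num_pieces_with_full_size_lesser_than_with_offset; infer_instance

-- ===== CLAIM (what is proved, stated in full; the proofs are below) =====
def Claim_equal_get_num_pieces_with_full_size_lesser_than_with_offset : Prop := ∀ (iter_object : List (List Int)) (full_size : Int) (offset : Int), Dom_get_num_pieces_with_full_size_lesser_than_with_offset iter_object full_size offset → Pre_get_num_pieces_with_full_size_lesser_than_with_offset iter_object full_size offset → Spec_get_num_pieces_with_full_size_lesser_than_with_offset iter_object full_size offset (get_num_pieces_with_full_size_lesser_than_with_offset iter_object full_size offset)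

-- ===== LEMMAS AND PROOFS =====

-- abstract count: largest prefix of the length list whose cumulative sum stays ≤ full_size
def pvCnt (full_size : Int) : Int → List Int → Int
  | _, [] => 0
  | acc, l :: r => if acc + l > full_size then 0 else 1 + pvCnt full_size (acc + l) r

-- abstract prefix sums of a length list
def pvPS : List Int → Int → List Int
  | [], _ => []
  | l :: r, t => (t + l) :: pvPS r (t + l)

theorem pvALoop_eq (xs : List (List Int)) (fs : Int) :
    ∀ (idxs : List Int) (acc cnt : Int),
      pvALoop xs fs idxs acc cnt = cnt + pvCnt fs acc (idxs.map (pvLenAt xs)) := by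
  intro idxs
  induction idxs with
  | nil => intro acc cnt; simp [pvALoop, pvCnt]
  | cons i rest ih =>
    intro acc cnt
    simp only [pvALoop, List.map_cons, pvCnt]
    split
    · simp
    · rw [ih]; ring

theorem pvSumsLoop_eq (xs : List (List Int)) :
    ∀ (idxs : List Int) (t : Int),
      pvSumsLoop xs idxs t = pvPS (idxs.map (pvLenAt xs)) t := by
  intro idxs
  induction idxs with
  | nil => intro t; simp [pvSumsLoop, pvPS]
  | cons i rest ih => intro t; simp [pvSumsLoop, pvPS, ih]

theorem pvCnt_eq_takeWhile (fs : Int) :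
    ∀ (ls : List Int) (t : Int),
      pvCnt fs t ls = (((pvPS ls t).takeWhile (fun s => s ≤ fs)).length : Int) := by
  intro ls
  induction ls with
  | nil => intro t; simp [pvCnt, pvPS]
  | cons l r ih =>
    intro t
    simp only [pvCnt, pvPS, List.takeWhile_cons]
    by_cases h : t + l ≤ fs
    · have : ¬ (t + l > fs) := by omega
      simp [h, this, ih (t + l)]
      ring
    · have : t + l > fs := by omega
      simp [h, this]

-- elements of pvPS ls t are ≥ t when all lengths are nonnegative
theorem pvPS_lower : ∀ (ls : List Int) (t : Int), (∀ l ∈ ls, 0 ≤ l) →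
    ∀ x ∈ pvPS ls t, t ≤ x := by
  intro ls
  induction ls with
  | nil => intro t _ x hx; simp [pvPS] at hx
  | cons l r ih =>
    intro t hnn x hx
    simp only [pvPS, List.mem_cons] at hx
    have hl : 0 ≤ l := hnn l (by simp)
    rcases hx with rfl | hx
    · omega
    · have := ih (t + l) (fun y hy => hnn y (by simp [hy])) x hx
      omega

theorem pvPS_pairwise : ∀ (ls : List Int) (t : Int), (∀ l ∈ ls, 0 ≤ l) →
    (pvPS ls t).Pairwise (· ≤ ·) := by
  intro ls
  induction ls with
  | nil => intro t _; simp [pvPS]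
  | cons l r ih =>
    intro t hnn
    simp only [pvPS, List.pairwise_cons]
    constructor
    · intro x hx
      exact pvPS_lower r (t + l) (fun y hy => hnn y (by simp [hy])) x hx
    · exact ih (t + l) (fun y hy => hnn y (by simp [hy]))

-- monotone indexing from Pairwise (· ≤ ·)
theorem pvMono (S : List Int) (hp : S.Pairwise (· ≤ ·)) :
    ∀ i j : Nat, i ≤ j → j < S.length → S.getD i 0 ≤ S.getD j 0 := by
  intro i j hij hj
  rcases Nat.lt_or_eq_of_le hij with h | rfl
  · have hi : i < S.length := Nat.lt_trans h hj
    rw [List.getD_eq_getElem S 0 hi, List.getD_eq_getElem S 0 hj]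
    exact List.pairwise_iff_getElem.mp hp i j hi hj h
  · exact le_refl _

-- every position before the takeWhile boundary satisfies the predicate
theorem pvTW_pos (fs : Int) : ∀ (S : List Int) (i : Nat),
    i < (S.takeWhile (fun s => s ≤ fs)).length → S.getD i 0 ≤ fs := by
  intro S
  induction S with
  | nil => intro i h; simp at h
  | cons a r ih =>
    intro i h
    simp only [List.takeWhile_cons] at h
    by_cases ha : a ≤ fs
    · simp [ha] at h
      cases i with
      | zero => simpa using ha
      | succ k =>
        simp only [List.getD_cons_succ]
        exact ih k (by omega)
    · simp [ha] at h

-- the element at the takeWhile boundary (if any) fails the predicate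
theorem pvTW_neg (fs : Int) : ∀ (S : List Int),
    (S.takeWhile (fun s => s ≤ fs)).length < S.length →
    fs < S.getD (S.takeWhile (fun s => s ≤ fs)).length 0 := by
  intro S
  induction S with
  | nil => intro h; simp at h
  | cons a r ih =>
    intro h
    by_cases ha : a ≤ fs
    · have h' : (r.takeWhile (fun s => s ≤ fs)).length < r.length := by
        simpa [List.takeWhile_cons, ha] using h
      simpa [List.takeWhile_cons, ha, List.getD_cons_succ] using ih h'
    · simp only [List.takeWhile_cons, ha, decide_false, Bool.false_eq_true, if_false,
        List.length_nil, List.getD_cons_zero]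
      omega

-- the invariants of the finished binary search pin lo to the takeWhile boundary
theorem pvBoundary (fs : Int) (S : List Int) (lo : Nat) (hle : lo ≤ S.length)
    (h3 : ∀ i : Nat, i < lo → S.getD i 0 ≤ fs)
    (h4 : ∀ i : Nat, lo ≤ i → i < S.length → fs < S.getD i 0) :
    lo = (S.takeWhile (fun s => s ≤ fs)).length := by
  have hkle : (S.takeWhile (fun s => s ≤ fs)).length ≤ S.length :=
    (List.takeWhile_prefix _).length_le
  rcases Nat.lt_trichotomy lo ((S.takeWhile (fun s => s ≤ fs)).length) with h | h | h
  · have e1 := pvTW_pos fs S lo h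
    have e2 := h4 lo (le_refl _) (lt_of_lt_of_le h hkle)
    omega
  · exact h
  · have e1 := pvTW_neg fs S (lt_of_lt_of_le h hle)
    have e2 := h3 _ h
    omega

theorem pvBS_eq (fs : Int) : ∀ (fuel : Nat) (S : List Int) (lo hi : Nat),
    S.Pairwise (· ≤ ·) →
    hi - lo ≤ fuel → lo ≤ hi → hi ≤ S.length →
    (∀ i : Nat, i < lo → S.getD i 0 ≤ fs) →
    (∀ i : Nat, hi ≤ i → i < S.length → fs < S.getD i 0) →
    pvBS S fs fuel lo hi = (S.takeWhile (fun s => s ≤ fs)).length := by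
  intro fuel
  induction fuel with
  | zero =>
    intro S lo hi hp hn h1 h2 h3 h4
    have hlohi : lo = hi := by omega
    subst hlohi
    exact pvBoundary fs S lo h2 h3 h4
  | succ m ih =>
    intro S lo hi hp hn h1 h2 h3 h4
    rw [pvBS]
    by_cases hlt : lo < hi
    · simp only [hlt, if_true]
      have hmid1 : lo ≤ (lo + hi) / 2 := by omega
      have hmid2 : (lo + hi) / 2 < hi := by omega
      by_cases hc : S.getD ((lo + hi) / 2) 0 ≤ fs
      · simp only [hc, if_true]
        apply ih S ((lo + hi) / 2 + 1) hi hp (by omega) (by omega) h2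
        · intro i hi'
          exact le_trans (pvMono S hp i ((lo + hi) / 2) (by omega) (by omega)) hc
        · exact h4
      · simp only [hc, if_false]
        apply ih S lo ((lo + hi) / 2) hp (by omega) (by omega) (by omega) h3
        intro i hi' hi2
        exact lt_of_lt_of_le (by omega : fs < S.getD ((lo + hi) / 2) 0)
          (pvMono S hp ((lo + hi) / 2) i hi' hi2)
    · simp only [hlt, if_false]
      have hlohi : lo = hi := by omega
      subst hlohi
      exact pvBoundary fs S lo h2 h3 h4

theorem pvLenAt_nonneg (xs : List (List Int)) (i : Int) : 0 ≤ pvLenAt xs i := by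
  simp [pvLenAt]

-- ===== VERDICT (by name: the statement is the Claim_ definition above) =====
theorem get_num_pieces_with_full_size_lesser_than_with_offset_spec : Claim_equal_get_num_pieces_with_full_size_lesser_than_with_offset := by
  intro xs fs off _hdom _hpre
  unfold Spec_get_num_pieces_with_full_size_lesser_than_with_offset
  unfold get_num_pieces_with_full_size_lesser_than_with_offset
  unfold get_num_pieces_with_full_size_lesser_than_with_offset_alt
  by_cases he : xs.isEmpty
  · simp [he]
  · simp only [he, if_false, Bool.false_eq_true]
    rw [pvSumsLoop_eq, pvALoop_eq]
    have hnn : ∀ l ∈ (PySem.List.pyRange off (xs.length : Int) 1).map (pvLenAt xs), 0 ≤ l := by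
      intro l hl
      simp only [List.mem_map] at hl
      rcases hl with ⟨i, _, rfl⟩
      exact pvLenAt_nonneg xs i
    rw [pvBS_eq fs (pvPS ((PySem.List.pyRange off (xs.length : Int) 1).map (pvLenAt xs)) 0).length
      (pvPS ((PySem.List.pyRange off (xs.length : Int) 1).map (pvLenAt xs)) 0) 0
      (pvPS ((PySem.List.pyRange off (xs.length : Int) 1).map (pvLenAt xs)) 0).length
      (pvPS_pairwise _ 0 hnn) (by omega) (by omega) (le_refl _)
      (by intro i h; omega) (by intro i h1 h2; omega)]
    rw [pvCnt_eq_takeWhile fs _ 0]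
    omega
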